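-- pv_equiv track=rewrite | github.com/loutfiwissal/PASSWORD | password.py | LongMaj
-- ===== SOURCE A (Python) =====
-- def LongMaj (P) :
--     max_langht2 = 0
--     current_sequence2 = 0
--
--     for i in range (len(P)):
--         if P[i] >= "A" and P[i] <= "Z" :
--             current_sequence2 += 1
--         else :
--             current_sequence2 = 0
--         if max_langht2 < current_sequence2 :
--             max_langht2 = current_sequence2
--     return max_langht2
-- ===== SOURCE B (Python) =====
-- def LongMaj(P):
--     # run-based: repeatedly measure the uppercase prefix of the rest, skip it
--     # plus one separator, keeping the best run length seen
--     best = 0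
--     rest = P
--     while rest:
--         run = 0
--         while run < len(rest) and "A" <= rest[run] <= "Z":
--             run += 1
--         if run > best:
--             best = run
--         rest = rest[run + 1:]
--     return best
-- ===== Notes on version B (the rewrite author's own statement) =====
-- stated objective: alternative
-- what changed: Replaces A's stateful per-character max/current counter with a loop over maximal uppercase runs: measure the uppercase prefix of the remaining suffix, keep the best, skip past the run and one separator.
import Mathlib
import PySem

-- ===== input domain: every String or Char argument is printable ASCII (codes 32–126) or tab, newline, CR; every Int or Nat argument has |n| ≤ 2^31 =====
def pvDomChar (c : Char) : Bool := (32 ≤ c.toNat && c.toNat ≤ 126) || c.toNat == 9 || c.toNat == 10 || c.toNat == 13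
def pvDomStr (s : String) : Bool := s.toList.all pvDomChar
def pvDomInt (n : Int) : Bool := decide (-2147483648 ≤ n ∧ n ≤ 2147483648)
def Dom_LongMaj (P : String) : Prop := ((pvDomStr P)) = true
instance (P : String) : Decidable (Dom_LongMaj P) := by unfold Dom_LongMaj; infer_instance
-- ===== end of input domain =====

-- B replaces A's per-character max/current counter pass with a loop over maximal uppercase runs (alternative decomposition, same cost).


-- ===== PORT A =====
-- A's loop body: current and max counters, exactly A's two ifs
def pvStepA (s : Int × Int) (c : Char) : Int × Int :=
  let cur := if 'A' ≤ c ∧ c ≤ 'Z' then s.2 + 1 else (0 : Int)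
  let mx := if s.1 < cur then cur else s.1
  (mx, cur)

def LongMaj (P : String) : Int :=
  let l := P.toList
  ((PySem.List.pyRange 0 (l.length : Int) 1).foldl
    (fun (s : Int × Int) i => pvStepA s (PySem.List.pyGetD l i ' ')) (0, 0)).1

-- ===== PORT B =====
-- length of the uppercase prefix of `rest` (B's inner while loop)
def pvUpPrefix : List Char → Nat
  | [] => 0
  | c :: rest => if 'A' ≤ c ∧ c ≤ 'Z' then pvUpPrefix rest + 1 else 0

-- B's outer while loop: measure the run, keep the best, skip run + 1 characters
def pvRuns : List Char → Int → Int
  | [], best => best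
  | c :: rest, best =>
      let run := pvUpPrefix (c :: rest)
      pvRuns ((c :: rest).drop (run + 1)) (if (run : Int) > best then run else best)
termination_by l => l.length
decreasing_by simp [List.length_drop]

def LongMaj_alt (P : String) : Int := pvRuns P.toList 0

-- ===== PRECONDITION & SPEC =====
def Spec_LongMaj (P : String) (out : Int) : Prop := out = LongMaj_alt P
instance (P : String) (out : Int) : Decidable (Spec_LongMaj P out) := by unfold Spec_LongMaj; infer_instance

-- ===== CLAIM (what is proved, stated in full; the proofs are below) =====
def Claim_equal_LongMaj : Prop := ∀ (P : String), Dom_LongMaj P → Spec_LongMaj P (LongMaj P)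

-- ===== LEMMAS AND PROOFS =====

-- proof helper: accumulator-free value of B's loop
def pvM : List Char → Int
  | [] => 0
  | c :: rest =>
      let run := pvUpPrefix (c :: rest)
      max (run : Int) (pvM ((c :: rest).drop (run + 1)))
termination_by l => l.length
decreasing_by simp [List.length_drop]

theorem pvM_nonneg (l : List Char) : 0 ≤ pvM l := by
  induction l using pvM.induct with
  | case1 => simp [pvM]
  | case2 c rest run ih => rw [pvM]; positivity

theorem pvRuns_eq (l : List Char) : ∀ best : Int, 0 ≤ best →
    pvRuns l best = max best (pvM l) := by
  induction l using pvM.induct with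
  | case1 => intro b hb; simp [pvRuns, pvM]; omega
  | case2 c rest run ih =>
    intro b hb
    have hrun : run = pvUpPrefix (c :: rest) := rfl
    rw [hrun] at ih
    rw [pvRuns, pvM]
    rw [ih _ (by positivity)]
    have := pvM_nonneg ((c :: rest).drop (pvUpPrefix (c :: rest) + 1))
    split_ifs <;> omega

-- the sequence of "current" values A's loop produces, folded with max
def pvH (c : Int) : List Char → Int
  | [] => 0
  | ch :: rest =>
      let c' := if 'A' ≤ ch ∧ ch ≤ 'Z' then c + 1 else (0 : Int)
      max c' (pvH c' rest)

theorem pvFoldA_eq (l : List Char) : ∀ (m c : Int), 0 ≤ c → c ≤ m →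
    (l.foldl pvStepA (m, c)).1 = max m (pvH c l) := by
  induction l with
  | nil => intro m c hc hcm; simp [pvH]; omega
  | cons ch rest ih =>
    intro m c hc hcm
    simp only [List.foldl_cons, pvH]
    by_cases h : 'A' ≤ ch ∧ ch ≤ 'Z'
    · have : pvStepA (m, c) ch = (max m (c + 1), c + 1) := by
        simp [pvStepA, h]
        split_ifs <;> omega
      rw [this, ih _ _ (by omega) (by omega)]
      simp only [if_pos h]
      omega
    · have : pvStepA (m, c) ch = (max m 0, 0) := by
        simp [pvStepA, h]
        split_ifs <;> omega
      rw [this, ih _ _ (by omega) (by omega)]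
      simp only [if_neg h]
      omega

theorem pvM_unfold (l : List Char) :
    pvM l = max (pvUpPrefix l : Int) (pvM (l.drop (pvUpPrefix l + 1))) := by
  cases l with
  | nil => simp [pvM, pvUpPrefix]
  | cons c rest => simp only [pvM]

theorem pvH_eq (l : List Char) : ∀ c : Int, 0 ≤ c →
    max c (pvH c l) = max (c + (pvUpPrefix l : Int)) (pvM (l.drop (pvUpPrefix l + 1))) := by
  induction l with
  | nil => intro c hc; simp [pvH, pvUpPrefix, pvM]
  | cons ch rest ih =>
    intro c hc
    simp only [pvH, pvUpPrefix]
    by_cases h : 'A' ≤ ch ∧ ch ≤ 'Z'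
    · simp only [if_pos h, List.drop_succ_cons]
      have hrec := ih (c + 1) (by omega)
      push_cast at hrec ⊢
      omega
    · simp only [if_neg h, List.drop_succ_cons, List.drop_zero, Nat.cast_zero]
      have hrec := ih 0 (by omega)
      have hu := pvM_unfold rest
      push_cast at hrec hu ⊢
      omega

-- ===== VERDICT (by name: the statement is the Claim_ definition above) =====
theorem LongMaj_spec : Claim_equal_LongMaj := by
  intro P _
  unfold Spec_LongMaj LongMaj LongMaj_alt
  simp only []
  rw [PySem.List.foldl_pyRange_zero_pyGetD' P.toList ' ' pvStepA (0, 0)]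
  rw [pvFoldA_eq P.toList 0 0 le_rfl le_rfl]
  rw [pvRuns_eq P.toList 0 le_rfl]
  have h := pvH_eq P.toList 0 le_rfl
  have h2 := pvM_unfold P.toList
  omega
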